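-- pv_equiv track=rewrite | github.com/H1drogen/Algorithms | codility/stone_wall.py | solution
-- ===== SOURCE A (Python) =====
-- def solution(H):
--     count = 0
--     base = H[0]
--     visited_heights = []
--     for height in H:
--         if height < base:
--             base = height
--             visited_heights = [height]
--             count += 1
--         if height not in visited_heights:
--             count += 1
--             visited_heights.append(height)
--     return count
-- ===== SOURCE B (Python) =====
-- def solution(H):
--     # Two-level scan: split H into maximal segments, each starting at a strict
--     # new running minimum, and sum the distinct-height count of each segment.
--     total = 0
--     i = 0
--     n = len(H)
--     while i < n:
--         v = H[i]
--         j = i + 1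
--         # extend the segment while heights stay at or above its base v
--         while j < n and H[j] >= v:
--             j += 1
--         total += len(set(H[i:j]))
--         i = j
--     return total
-- ===== Notes on version B (the rewrite author's own statement) =====
-- stated objective: faster
-- what changed: Replaces the single stateful pass (running base plus a visited list probed by linear 'in' scans, reset on each new minimum) by a two-level scan that cuts the wall into maximal segments at strict new running minimums and sums len(set(segment)) per segment.
import Mathlib
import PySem

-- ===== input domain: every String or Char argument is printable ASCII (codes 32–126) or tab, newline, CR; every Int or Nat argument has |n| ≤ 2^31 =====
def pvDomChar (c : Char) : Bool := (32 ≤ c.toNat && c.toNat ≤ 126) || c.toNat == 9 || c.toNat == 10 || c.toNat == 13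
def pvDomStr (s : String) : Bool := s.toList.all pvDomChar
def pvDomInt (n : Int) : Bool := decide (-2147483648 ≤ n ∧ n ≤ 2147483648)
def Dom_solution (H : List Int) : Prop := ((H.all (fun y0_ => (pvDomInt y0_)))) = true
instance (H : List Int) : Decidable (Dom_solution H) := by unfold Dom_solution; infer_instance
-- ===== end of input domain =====

-- B replaces A's stateful pass (running base + visited list, reset at new minimums) by a
-- two-level scan over maximal segments, summing each segment's distinct-height count.

-- ===== PORT A =====
-- A's for-loop, state (count, base, visited_heights); branches in A's order.
def solutionLoop (count base : Int) (visited : List Int) : List Int → Int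
  | [] => count
  | h :: t =>
    if h < base then
      -- reset: count += 1, base = h, visited = [h]; A's second if then sees h ∈ [h] and is skipped
      solutionLoop (count + 1) h [h] t
    else if h ∉ visited then solutionLoop (count + 1) base (visited ++ [h]) t
    else solutionLoop count base visited t

def solution (H : List Int) : Int :=
  match H with
  | [] => 0          -- unreachable under Pre_solution: Python A raises IndexError at H[0]
  | b :: _ => solutionLoop 0 b [] H

-- ===== PORT B =====
-- inner while loop: split off the heights ≥ v (the rest starts at the next reset)
def segSpan (v : Int) : List Int → List Int × List Int
  | [] => ([], [])
  | h :: t => if v ≤ h then (h :: (segSpan v t).1, (segSpan v t).2) else ([], h :: t)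

theorem segSpan_snd_length_le (v : Int) (L : List Int) : (segSpan v L).2.length ≤ L.length := by
  induction L with
  | nil => simp [segSpan]
  | cons h t ih =>
    simp only [segSpan]
    split
    · simpa using Nat.le_succ_of_le ih
    · simp

-- outer while loop over the remaining suffix of H
def solution_alt : List Int → Int
  | [] => 0
  | v :: rest =>
    ((PySem.Set.ofList (v :: (segSpan v rest).1)).length : Int) + solution_alt (segSpan v rest).2
termination_by L => L.length
decreasing_by
  simpa using Nat.lt_succ_of_le (segSpan_snd_length_le v rest)

-- ===== PRECONDITION & SPEC =====
-- Pre_ excludes only the empty list, where A raises IndexError (H[0]).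
def Pre_solution (H : List Int) : Prop := H ≠ []
instance (H : List Int) : Decidable (Pre_solution H) := by unfold Pre_solution; infer_instance
def pvWitness_solution : List Int := [3, 1, 2]

def Spec_solution (H : List Int) (out : Int) : Prop := out = solution_alt H
instance (H : List Int) (out : Int) : Decidable (Spec_solution H out) := by unfold Spec_solution; infer_instance

-- ===== CLAIM (what is proved, stated in full; the proofs are below) =====
def Claim_equal_solution : Prop := ∀ (H : List Int), Dom_solution H → Pre_solution H → Spec_solution H (solution H)

-- ===== LEMMAS AND PROOFS =====

-- the number of heights of seg that are new relative to visited (A's inner if, distilled)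
def countNew (visited : List Int) : List Int → Nat
  | [] => 0
  | h :: t => if h ∈ visited then countNew visited t else 1 + countNew (visited ++ [h]) t

theorem foldl_add_length (seg : List Int) : ∀ (visited : List Int), visited.Nodup →
    (seg.foldl PySem.Set.add visited).length = visited.length + countNew visited seg := by
  induction seg with
  | nil => intro visited _; simp [countNew]
  | cons h t ih =>
    intro visited hnd
    by_cases hm : h ∈ visited
    · simp [countNew, hm, ih visited hnd]
    · have hnd' : (visited ++ [h]).Nodup := by
        rw [List.nodup_append]
        exact ⟨hnd, List.nodup_singleton h, (by intro a ha b hb; simp only [List.mem_singleton] at hb; subst hb; exact fun he => hm (he ▸ ha))⟩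
      simp [countNew, hm, ih _ hnd']
      omega

theorem ofList_append_length (visited seg : List Int) (hnd : visited.Nodup) :
    (PySem.Set.ofList (visited ++ seg)).length = visited.length + countNew visited seg := by
  have h1 : PySem.Set.ofList (visited ++ seg) = seg.foldl PySem.Set.add (PySem.Set.ofList visited) := by
    rw [PySem.Set.ofList_eq_foldl, PySem.Set.ofList_eq_foldl, List.foldl_append]
  have h2 : PySem.Set.ofList visited = visited := PySem.Set.ofList_eq_self_of_nodup _ hnd
  rw [h1, h2, foldl_add_length seg visited hnd]

theorem loop_eq (L : List Int) : ∀ (c v : Int) (visited : List Int), visited.Nodup →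
    solutionLoop c v visited L =
      c + (countNew visited (segSpan v L).1 : Int) + solution_alt (segSpan v L).2 := by
  induction L with
  | nil => intro c v visited _; simp [solutionLoop, segSpan, countNew, solution_alt]
  | cons h t ih =>
    intro c v visited hnd
    by_cases hlt : h < v
    · -- reset: new segment starts at h
      have hns : ¬ v ≤ h := by omega
      simp only [solutionLoop, segSpan, if_pos hlt, if_neg hns]
      rw [ih (c + 1) h [h] (by simp)]
      have hset : ((PySem.Set.ofList (h :: (segSpan h t).1)).length : Nat)
          = 1 + countNew [h] (segSpan h t).1 := by
        have := ofList_append_length [h] (segSpan h t).1 (by simp)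
        simpa using this
      simp only [countNew, solution_alt, hset]
      push_cast
      ring
    · -- same segment
      have hle : v ≤ h := by omega
      simp only [solutionLoop, if_neg hlt, segSpan, if_pos hle]
      by_cases hm : h ∈ visited
      · rw [if_neg (by simpa using hm)]
        rw [ih c v visited hnd]
        simp [countNew, hm]
      · have hnd' : (visited ++ [h]).Nodup := by
          rw [List.nodup_append]
          exact ⟨hnd, List.nodup_singleton h, (by intro a ha b hb; simp only [List.mem_singleton] at hb; subst hb; exact fun he => hm (he ▸ ha))⟩
        rw [if_pos (by simpa using hm)]
        rw [ih (c + 1) v (visited ++ [h]) hnd']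
        simp [countNew, hm]
        ring

-- ===== VERDICT (by name: the statement is the Claim_ definition above) =====
theorem solution_spec : Claim_equal_solution := by
  intro H _ hpre
  unfold Spec_solution
  match H with
  | [] => exact absurd rfl hpre
  | v :: rest =>
    have h0 : solution (v :: rest) = solutionLoop 1 v [v] rest := by
      simp [solution, solutionLoop]
    rw [h0, loop_eq rest 1 v [v] (by simp)]
    have hset : ((PySem.Set.ofList (v :: (segSpan v rest).1)).length : Nat)
        = 1 + countNew [v] (segSpan v rest).1 := by
      have := ofList_append_length [v] (segSpan v rest).1 (by simp)
      simpa using this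
    simp only [solution_alt, hset]
    push_cast
    ring
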